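-- pv_equiv track=rewrite | github.com/language-ml/Tajiki-Shahname | 02_Align Verses/02_align_verse.py | nearest_match
-- ===== SOURCE A (Python) =====
-- def nearest_match(tg_verses, fa_verses):
--     if len(tg_verses) == len(fa_verses) == 1:
--         return [(tg_verses[0], fa_verses[0])]
--     else:
--         return_value = []
--         for tg_item in tg_verses:
--             nearest = fa_verses[0]
--             for fa_item in fa_verses:
--                 if abs(tg_item[0] - fa_item[0]) < abs(tg_item[0] - nearest[0]):
--                     nearest = fa_item
--             return_value.append((tg_item, nearest))
--         return return_value
-- ===== SOURCE B (Python) =====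
-- def nearest_match(tg_verses, fa_verses):
--     # first occurrence of each fa coordinate: coord -> (original index, verse)
--     first = {}
--     for i, v in enumerate(fa_verses):
--         if v[0] not in first:
--             first[v[0]] = (i, v)
--     entries = sorted(first.items(), key=lambda kv: kv[0])  # distinct coords, ascending
--     coords = [kv[0] for kv in entries]
--     result = []
--     for tg in tg_verses:
--         t = tg[0]
--         # hand-written bisect_left (insertion point of t in coords)
--         lo, hi = 0, len(coords)
--         while lo < hi:
--             mid = (lo + hi) // 2
--             if coords[mid] < t:
--                 lo = mid + 1
--             else:
--                 hi = mid
--         if lo == 0: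
--             best = entries[0]
--         elif lo == len(entries):
--             best = entries[-1]
--         else:
--             cl, (il, _) = entries[lo - 1]
--             cr, (ir, _) = entries[lo]
--             if (t - cl, il) < (cr - t, ir):
--                 best = entries[lo - 1]
--             else:
--                 best = entries[lo]
--         result.append((tg, best[1][1]))
--     return result
-- ===== Notes on version B (the rewrite author's own statement) =====
-- stated objective: faster
-- what changed: Instead of scanning all fa_verses for every tg verse, B builds the first-occurrence entry per distinct fa coordinate once, sorts those entries by coordinate, and answers each tg verse by a hand-written binary search picking between the two neighbouring coordinates (ties broken by smallest original index, matching A's keep-first rule).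
import Mathlib
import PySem

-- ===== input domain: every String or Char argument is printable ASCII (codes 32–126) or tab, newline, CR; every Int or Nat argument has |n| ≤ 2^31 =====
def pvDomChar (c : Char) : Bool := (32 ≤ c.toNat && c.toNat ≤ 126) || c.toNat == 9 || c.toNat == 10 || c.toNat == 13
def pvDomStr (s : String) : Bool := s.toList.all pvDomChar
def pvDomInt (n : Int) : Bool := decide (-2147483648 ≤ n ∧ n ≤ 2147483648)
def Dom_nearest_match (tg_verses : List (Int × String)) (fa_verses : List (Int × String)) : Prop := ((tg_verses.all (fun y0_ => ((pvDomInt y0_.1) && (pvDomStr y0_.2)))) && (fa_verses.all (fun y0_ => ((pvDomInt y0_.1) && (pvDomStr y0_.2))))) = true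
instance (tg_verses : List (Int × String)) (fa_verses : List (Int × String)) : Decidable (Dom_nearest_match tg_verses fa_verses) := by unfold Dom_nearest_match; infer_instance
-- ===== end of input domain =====

-- B replaces A's per-verse linear scan by: first-occurrence entry per distinct fa coordinate,
-- sorted by coordinate, then a binary search per tg verse (objective: faster, asymptotic).

-- ===== PORT A =====
def nearest_match (tg_verses : List (Int × String)) (fa_verses : List (Int × String)) : List ((Int × String) × (Int × String)) :=
  if tg_verses.length = 1 ∧ fa_verses.length = 1 then
    [((PySem.List.pyGet? tg_verses 0).getD (0, ""), (PySem.List.pyGet? fa_verses 0).getD (0, ""))]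
  else
    tg_verses.foldl
      (fun return_value tg_item =>
        return_value ++
          [(tg_item,
            fa_verses.foldl
              (fun nearest fa_item =>
                if |tg_item.1 - fa_item.1| < |tg_item.1 - nearest.1| then fa_item else nearest)
              ((PySem.List.pyGet? fa_verses 0).getD (0, "")))])
      []

-- ===== PORT B =====
def nmDfltEntry : Int × (Int × (Int × String)) := (0, (0, (0, "")))

def nearest_match_alt (tg_verses : List (Int × String)) (fa_verses : List (Int × String)) : List ((Int × String) × (Int × String)) :=
  let first : PySem.Dict Int (Int × (Int × String)) :=
    (PySem.List.enumerate fa_verses 0).foldl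
      (fun d p => if d.contains p.2.1 then d else d.insert p.2.1 (p.1, p.2)) ⟨[]⟩
  let entries := PySem.List.sorted first.items (fun kv => kv.1)
  let coords := entries.map (fun kv => kv.1)
  tg_verses.foldl
    (fun result tg =>
      let t := tg.1
      -- the hand-written lo/hi loop in Source B is exactly PySem.List.bisectLeft's loop
      -- (while lo < hi: mid = (lo+hi)//2; if coords[mid] < t: lo = mid+1 else hi = mid), step for step
      let lo := PySem.List.bisectLeft coords t
      let best :=
        if lo = 0 then entries.getD 0 nmDfltEntry
        else if lo = entries.length then entries.getD (entries.length - 1) nmDfltEntry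
        else
          let el := entries.getD (lo - 1) nmDfltEntry
          let er := entries.getD lo nmDfltEntry
          if t - el.1 < er.1 - t ∨ (t - el.1 = er.1 - t ∧ el.2.1 < er.2.1) then el else er
      result ++ [(tg, best.2.2)])
    []

-- ===== PRECONDITION & SPEC =====
-- Pre_ excludes exactly the inputs where A raises IndexError (fa_verses empty while tg_verses is not:
-- A evaluates fa_verses[0]); B raises there too.
def Pre_nearest_match (tg_verses : List (Int × String)) (fa_verses : List (Int × String)) : Prop :=
  tg_verses = [] ∨ fa_verses ≠ []
instance (tg_verses : List (Int × String)) (fa_verses : List (Int × String)) : Decidable (Pre_nearest_match tg_verses fa_verses) := by unfold Pre_nearest_match; infer_instance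
def pvWitness_nearest_match : (List (Int × String)) × (List (Int × String)) :=
  ([(1, "a"), (4, "b")], [(0, "x"), (2, "y"), (2, "z")])

def Spec_nearest_match (tg_verses : List (Int × String)) (fa_verses : List (Int × String)) (out : List ((Int × String) × (Int × String))) : Prop := out = nearest_match_alt tg_verses fa_verses
instance (tg_verses : List (Int × String)) (fa_verses : List (Int × String)) (out : List ((Int × String) × (Int × String))) : Decidable (Spec_nearest_match tg_verses fa_verses out) := by unfold Spec_nearest_match; infer_instance

-- ===== CLAIM (what is proved, stated in full; the proofs are below) =====
def Claim_equal_nearest_match : Prop := ∀ (tg_verses : List (Int × String)) (fa_verses : List (Int × String)), Dom_nearest_match tg_verses fa_verses → Pre_nearest_match tg_verses fa_verses → Spec_nearest_match tg_verses fa_verses (nearest_match tg_verses fa_verses)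

-- ===== LEMMAS AND PROOFS =====

-- Abbreviations for the two per-verse computations (definitionally the bodies of the ports).
def nmInner (t : Int) (fa : List (Int × String)) : Int × String :=
  fa.foldl (fun nearest x => if |t - x.1| < |t - nearest.1| then x else nearest)
    ((PySem.List.pyGet? fa 0).getD (0, ""))

def nmStep (d : PySem.Dict Int (Int × (Int × String))) (p : Int × (Int × String)) : PySem.Dict Int (Int × (Int × String)) :=
  if d.contains p.2.1 then d else d.insert p.2.1 (p.1, p.2)

def nmDict (fa : List (Int × String)) : PySem.Dict Int (Int × (Int × String)) :=
  (PySem.List.enumerate fa 0).foldl nmStep ⟨[]⟩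

def nmEntries (fa : List (Int × String)) : List (Int × (Int × (Int × String))) :=
  PySem.List.sorted (nmDict fa).items (fun kv => kv.1)

def nmLookup (t : Int) (fa : List (Int × String)) : Int × String :=
  let entries := nmEntries fa
  let coords := entries.map (fun kv => kv.1)
  let lo := PySem.List.bisectLeft coords t
  let best :=
    if lo = 0 then entries.getD 0 nmDfltEntry
    else if lo = entries.length then entries.getD (entries.length - 1) nmDfltEntry
    else
      let el := entries.getD (lo - 1) nmDfltEntry
      let er := entries.getD lo nmDfltEntry
      if t - el.1 < er.1 - t ∨ (t - el.1 = er.1 - t ∧ el.2.1 < er.2.1) then el else er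
  best.2.2

-- "r is the first element of l at minimal |t - coordinate|" — the common specification.
def FirstMin (t : Int) (l : List (Int × String)) (r : Int × String) : Prop :=
  ∃ k, ∃ _ : k < l.length, l[k] = r ∧
    (∀ j (_ : j < l.length), |t - r.1| ≤ |t - l[j].1|) ∧
    (∀ j (_ : j < l.length), j < k → |t - r.1| < |t - l[j].1|)

theorem firstMin_unique (t : Int) (l : List (Int × String)) (r r' : Int × String)
    (h : FirstMin t l r) (h' : FirstMin t l r') : r = r' := by
  obtain ⟨k, hk, hkr, hmin, hfst⟩ := h
  obtain ⟨k', hk', hkr', hmin', hfst'⟩ := h'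
  rcases lt_trichotomy k k' with hlt | heq | hgt
  · have h1 := hfst' k hk hlt
    have h2 := hmin k' hk'
    rw [hkr] at h1; rw [hkr'] at h2; omega
  · subst heq; rw [← hkr, ← hkr']
  · have h1 := hfst k' hk' hgt
    have h2 := hmin' k hk
    rw [hkr'] at h1; rw [hkr] at h2; omega

-- ---------- A side: the inner fold computes FirstMin ----------
def nmFoldA (t : Int) (x : Int × String) (xs : List (Int × String)) : Int × String :=
  xs.foldl (fun nearest y => if |t - y.1| < |t - nearest.1| then y else nearest) x

theorem nmFoldA_spec (t : Int) : ∀ (xs : List (Int × String)) (x : Int × String),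
    (nmFoldA t x xs = x ∧ ∀ y ∈ xs, |t - x.1| ≤ |t - y.1|) ∨
    (∃ k, ∃ _ : k < xs.length, xs[k] = nmFoldA t x xs ∧
      |t - (nmFoldA t x xs).1| < |t - x.1| ∧
      (∀ j (_ : j < xs.length), |t - (nmFoldA t x xs).1| ≤ |t - xs[j].1|) ∧
      (∀ j (_ : j < xs.length), j < k → |t - (nmFoldA t x xs).1| < |t - xs[j].1|)) := by
  intro xs
  induction xs with
  | nil => intro x; left; exact ⟨rfl, by simp⟩
  | cons y ys ih =>
    intro x
    have hstep : nmFoldA t x (y :: ys) = nmFoldA t (if |t - y.1| < |t - x.1| then y else x) ys := by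
      simp [nmFoldA]
    by_cases hy : |t - y.1| < |t - x.1|
    · rw [if_pos hy] at hstep
      rcases ih y with ⟨heq, hall⟩ | ⟨k, hk, hkr, hlt, hmin, hfst⟩
      · right
        refine ⟨0, by simp, ?_, ?_, ?_, ?_⟩
        · simpa [hstep] using heq.symm
        · rw [hstep, heq]; exact hy
        · intro j hj
          match j, hj with
          | 0, _ => simp [hstep, heq]
          | j + 1, hj =>
            have hj' : j < ys.length := by simpa using hj
            have := hall ys[j] (List.getElem_mem hj')
            simpa [hstep, heq] using this
        · intro j _ hj; omega
      · right
        refine ⟨k + 1, by simpa using Nat.succ_lt_succ hk, ?_, ?_, ?_, ?_⟩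
        · simpa [hstep] using hkr
        · rw [hstep]; exact lt_trans hlt hy
        · intro j hj
          match j, hj with
          | 0, _ => rw [hstep]; simpa using le_of_lt hlt
          | j + 1, hj =>
            have hj' : j < ys.length := by simpa using hj
            rw [hstep]; simpa using hmin j hj'
        · intro j hj hjk
          match j, hj with
          | 0, _ => rw [hstep]; simpa using hlt
          | j + 1, hj =>
            have hj' : j < ys.length := by simpa using hj
            rw [hstep]; simpa using hfst j hj' (by omega)
    · rw [if_neg hy] at hstep
      push_neg at hy
      rcases ih x with ⟨heq, hall⟩ | ⟨k, hk, hkr, hlt, hmin, hfst⟩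
      · left
        refine ⟨by rw [hstep]; exact heq, ?_⟩
        intro z hz
        rcases List.mem_cons.mp hz with hz | hz
        · subst hz; exact hy
        · exact hall z hz
      · right
        refine ⟨k + 1, by simpa using Nat.succ_lt_succ hk, ?_, ?_, ?_, ?_⟩
        · simpa [hstep] using hkr
        · rw [hstep]; exact hlt
        · intro j hj
          match j, hj with
          | 0, _ => rw [hstep]; simpa using le_of_lt (lt_of_lt_of_le hlt hy)
          | j + 1, hj =>
            have hj' : j < ys.length := by simpa using hj
            rw [hstep]; simpa using hmin j hj'
        · intro j hj hjk
          match j, hj with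
          | 0, _ => rw [hstep]; simpa using lt_of_lt_of_le hlt hy
          | j + 1, hj =>
            have hj' : j < ys.length := by simpa using hj
            rw [hstep]; simpa using hfst j hj' (by omega)

theorem nmInner_head (x : Int × String) (xs : List (Int × String)) (t : Int) :
    nmInner t (x :: xs) = nmFoldA t x xs := by
  have h0 : (PySem.List.pyGet? (x :: xs) 0).getD (0, "") = x := by
    simp [PySem.List.pyGet?, PySem.List.pyIdx?]
  simp only [nmInner, h0, List.foldl_cons, nmFoldA]
  congr 1
  simp

theorem nmInner_firstMin (t : Int) (fa : List (Int × String)) (hfa : fa ≠ []) :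
    FirstMin t fa (nmInner t fa) := by
  obtain ⟨x, xs, rfl⟩ := List.exists_cons_of_ne_nil hfa
  rw [nmInner_head]
  rcases nmFoldA_spec t xs x with ⟨heq, hall⟩ | ⟨k, hk, hkr, hlt, hmin, hfst⟩
  · refine ⟨0, by simp, by simpa using heq.symm, ?_, ?_⟩
    · intro j hj
      match j, hj with
      | 0, _ => simp [heq]
      | j + 1, hj =>
        have hj' : j < xs.length := by simpa using hj
        rw [heq]; simpa using hall xs[j] (List.getElem_mem hj')
    · intro j _ hj; omega
  · refine ⟨k + 1, by simpa using Nat.succ_lt_succ hk, by simpa using hkr, ?_, ?_⟩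
    · intro j hj
      match j, hj with
      | 0, _ => simpa using le_of_lt hlt
      | j + 1, hj =>
        have hj' : j < xs.length := by simpa using hj
        simpa using hmin j hj'
    · intro j hj hjk
      match j, hj with
      | 0, _ => simpa using hlt
      | j + 1, hj =>
        have hj' : j < xs.length := by simpa using hj
        simpa using hfst j hj' (by omega)

-- ---------- B side: the dictionary of first occurrences ----------
theorem nmEnumerate_append (xs : List (Int × String)) (x : Int × String) (s : Int) :
    PySem.List.enumerate (xs ++ [x]) s = PySem.List.enumerate xs s ++ [(s + xs.length, x)] := by
  induction xs generalizing s with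
  | nil => simp [PySem.List.enumerate]
  | cons y ys ih =>
    simp only [List.cons_append, PySem.List.enumerate, ih (s + 1), List.length_cons]
    push_cast
    ring_nf

theorem nmDict_append (fa : List (Int × String)) (x : Int × String) :
    nmDict (fa ++ [x]) = nmStep (nmDict fa) ((fa.length : Int), x) := by
  unfold nmDict
  rw [nmEnumerate_append, List.foldl_append]
  norm_num

theorem nmContains_iff (d : PySem.Dict Int (Int × (Int × String))) (c : Int) :
    d.contains c = true ↔ ∃ e ∈ d.items, e.1 = c := by
  simp [PySem.Dict.contains, List.any_eq_true]

-- The three invariants of the first-occurrence dictionary.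
theorem nmDict_spec (fa : List (Int × String)) :
    (∀ e ∈ (nmDict fa).items, ∃ k, ∃ _ : k < fa.length, e.2.1 = (k : Int) ∧ fa[k] = e.2.2 ∧
        e.2.2.1 = e.1 ∧ ∀ j (_ : j < fa.length), j < k → fa[j].1 ≠ e.1) ∧
    (∀ k (_ : k < fa.length), ∃ e ∈ (nmDict fa).items, e.1 = fa[k].1 ∧ e.2.1 ≤ (k : Int)) ∧
    ((nmDict fa).items.Pairwise (fun e e' => e.1 ≠ e'.1)) := by
  induction fa using List.reverseRecOn with
  | nil => refine ⟨?_, ?_, ?_⟩ <;> simp [nmDict, PySem.List.enumerate]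
  | append_singleton fa x ih =>
    obtain ⟨hE1, hE2, hE3⟩ := ih
    rw [nmDict_append]
    by_cases hc : (nmDict fa).contains x.1 = true
    · have hstep : nmStep (nmDict fa) ((fa.length : Int), x) = nmDict fa := by
        simp [nmStep, hc]
      rw [hstep]
      refine ⟨?_, ?_, hE3⟩
      · intro e he
        obtain ⟨k, hk, h1, h2, h3, h4⟩ := hE1 e he
        refine ⟨k, by simp; omega, h1, ?_, h3, ?_⟩
        · rw [List.getElem_append, dif_pos hk]; exact h2
        · intro j hj hjk
          have hjlen : j < fa.length := by omega
          have := h4 j hjlen hjk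
          rwa [List.getElem_append, dif_pos hjlen]
      · intro k hk
        by_cases hklen : k < fa.length
        · obtain ⟨e, he, h1, h2⟩ := hE2 k hklen
          exact ⟨e, he, by rwa [List.getElem_append, dif_pos hklen], h2⟩
        · have hkeq : k = fa.length := by simp at hk; omega
          obtain ⟨e, he, hec⟩ := (nmContains_iff _ _).mp hc
          obtain ⟨k0, hk0, h1, _, _, _⟩ := hE1 e he
          refine ⟨e, he, ?_, by rw [h1]; omega⟩
          rw [List.getElem_append, dif_neg (by omega)]
          simp [hkeq, hec]
    · have hstep : nmStep (nmDict fa) ((fa.length : Int), x)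
          = ⟨(nmDict fa).items ++ [(x.1, ((fa.length : Int), x))]⟩ := by
        simp only [nmStep, hc]
        rw [if_neg (by simp)]
        simp [PySem.Dict.insert, hc]
      rw [hstep]
      have hnotin : ∀ e ∈ (nmDict fa).items, e.1 ≠ x.1 := by
        intro e he heq
        exact hc ((nmContains_iff _ _).mpr ⟨e, he, heq⟩)
      refine ⟨?_, ?_, ?_⟩
      · intro e he
        dsimp only at he
        rcases List.mem_append.mp he with he | he
        · obtain ⟨k, hk, h1, h2, h3, h4⟩ := hE1 e he
          refine ⟨k, by simp; omega, h1, ?_, h3, ?_⟩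
          · rw [List.getElem_append, dif_pos hk]; exact h2
          · intro j hj hjk
            have hjlen : j < fa.length := by omega
            have := h4 j hjlen hjk
            rwa [List.getElem_append, dif_pos hjlen]
        · have he' : e = (x.1, ((fa.length : Int), x)) := by simpa using he
          subst he'
          refine ⟨fa.length, by simp, by simp, ?_, by simp, ?_⟩
          · rw [List.getElem_append, dif_neg (by omega)]; simp
          · intro j hj hjk
            have hjlen : j < fa.length := hjk
            rw [List.getElem_append, dif_pos hjlen]
            intro heq
            obtain ⟨e', he', h1', h2'⟩ := hE2 j hjlen
            exact hnotin e' he' (by rw [h1', heq])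
      · intro k hk
        by_cases hklen : k < fa.length
        · obtain ⟨e, he, h1, h2⟩ := hE2 k hklen
          refine ⟨e, by dsimp only; exact List.mem_append.mpr (Or.inl he), ?_, h2⟩
          rwa [List.getElem_append, dif_pos hklen]
        · have hkeq : k = fa.length := by simp at hk; omega
          refine ⟨(x.1, ((fa.length : Int), x)), by dsimp only; simp, ?_, by simp [hkeq]⟩
          rw [List.getElem_append, dif_neg (by omega)]
          simp [hkeq]
      · dsimp only
        rw [List.pairwise_append]
        refine ⟨hE3, by simp, ?_⟩
        intro e he e' he'
        have he'' : e' = (x.1, ((fa.length : Int), x)) := by simpa using he'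
        subst he''
        exact hnotin e he

theorem nmEntries_mem (fa : List (Int × String)) (e : Int × (Int × (Int × String))) :
    e ∈ nmEntries fa ↔ e ∈ (nmDict fa).items := by
  simp [nmEntries, PySem.List.mem_sorted]

theorem nmEntries_pairwise_lt (fa : List (Int × String)) :
    (nmEntries fa).Pairwise (fun e e' => e.1 < e'.1) := by
  have h1 : (nmEntries fa).Pairwise (fun e e' => e.1 ≤ e'.1) :=
    PySem.List.sorted_pairwise (nmDict fa).items (fun kv => kv.1)
  have hperm : (nmEntries fa).Perm (nmDict fa).items :=
    PySem.List.sorted_perm (nmDict fa).items (fun kv => kv.1) false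
  have h2 : (nmEntries fa).Pairwise (fun e e' => e.1 ≠ e'.1) := by
    have h3 := (nmDict_spec fa).2.2
    exact h3.perm hperm.symm Ne.symm
  exact (h1.and h2).imp (fun h => lt_of_le_of_ne h.1 h.2)

-- ---------- B side: the binary-search lookup computes FirstMin ----------
theorem nmLookup_firstMin (t : Int) (fa : List (Int × String)) (hfa : fa ≠ []) :
    FirstMin t fa (nmLookup t fa) := by
  obtain ⟨hE1, hE2, _⟩ := nmDict_spec fa
  set E := nmEntries fa with hEdef
  have hElt : E.Pairwise (fun e e' => e.1 < e'.1) := nmEntries_pairwise_lt fa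
  have hfalen : 0 < fa.length := List.length_pos_of_ne_nil hfa
  have hn : 0 < E.length := by
    obtain ⟨e, he, _, _⟩ := hE2 0 hfalen
    have : e ∈ E := (nmEntries_mem fa e).mpr he
    exact List.length_pos_of_mem this
  set n := E.length with hndef
  -- everything below is phrased with getD so that omega sees uniform atoms
  have hD : ∀ i (hi : i < n), E.getD i nmDfltEntry = E[i]'(hndef ▸ hi) := by
    intro i hi
    exact List.getD_eq_getElem E nmDfltEntry (hndef ▸ hi)
  have hmono : ∀ p q, p < q → q < n →
      (E.getD p nmDfltEntry).1 < (E.getD q nmDfltEntry).1 := by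
    intro p q hpq hq
    rw [hD p (by omega), hD q hq]
    exact List.pairwise_iff_getElem.mp hElt p q (by omega) (by omega) hpq
  set coords := E.map (fun kv => kv.1) with hcdef
  have hclen : coords.length = n := by simp [hcdef, hndef]
  have hcget : ∀ j, j < n → coords.getD j 0 = (E.getD j nmDfltEntry).1 := by
    intro j hj
    rw [List.getD_eq_getElem coords 0 (by omega), hD j hj]
    simp [hcdef]
  have hcpair : coords.Pairwise (fun a b => a ≤ b) := by
    rw [hcdef, List.pairwise_map]
    exact hElt.imp (fun h => le_of_lt h)
  obtain ⟨hlo_le, hlo_lt, hlo_ge⟩ := PySem.List.bisectLeft_spec coords t hcpair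
  set lo := PySem.List.bisectLeft coords t with hlodef
  rw [hclen] at hlo_le
  have hlt_t : ∀ j, j < n → j < lo → (E.getD j nmDfltEntry).1 < t := by
    intro j hj hjlo
    have h := hlo_lt j (by omega) hjlo
    rw [← hcget j hj, List.getD_eq_getElem coords 0 (by omega)]
    exact h
  have hge_t : ∀ j, j < n → lo ≤ j → t ≤ (E.getD j nmDfltEntry).1 := by
    intro j hj hjlo
    have h := hlo_ge j (by omega) hjlo
    rw [← hcget j hj, List.getD_eq_getElem coords 0 (by omega)]
    exact h
  have hidx_ne : ∀ p q, p < n → q < n → p ≠ q →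
      (E.getD p nmDfltEntry).2.1 ≠ (E.getD q nmDfltEntry).2.1 := by
    intro p q hp hq hpq heq
    obtain ⟨kp, hkp, h1p, h2p, h3p, _⟩ :=
      hE1 (E.getD p nmDfltEntry) ((nmEntries_mem fa _).mp (by rw [hD p hp]; exact List.getElem_mem _))
    obtain ⟨kq, hkq, h1q, h2q, h3q, _⟩ :=
      hE1 (E.getD q nmDfltEntry) ((nmEntries_mem fa _).mp (by rw [hD q hq]; exact List.getElem_mem _))
    have hkk : kp = kq := by rw [h1p, h1q] at heq; exact_mod_cast heq
    subst hkk
    have hceq : (E.getD p nmDfltEntry).1 = (E.getD q nmDfltEntry).1 := by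
      rw [← h3p, ← h3q, ← h2p, ← h2q]
    rcases Nat.lt_or_ge p q with h | h
    · exact absurd hceq (ne_of_lt (hmono p q h hq))
    · have hqp : q < p := by omega
      exact absurd hceq.symm (ne_of_lt (hmono q p hqp hp))
  have hmain : ∃ k', ∃ _ : k' < n, nmLookup t fa = (E.getD k' nmDfltEntry).2.2 ∧
      ∀ q, q < n → q ≠ k' →
        (|t - (E.getD k' nmDfltEntry).1| < |t - (E.getD q nmDfltEntry).1| ∨
          (|t - (E.getD k' nmDfltEntry).1| = |t - (E.getD q nmDfltEntry).1| ∧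
            (E.getD k' nmDfltEntry).2.1 < (E.getD q nmDfltEntry).2.1)) := by
    have hlook : nmLookup t fa =
        (if lo = 0 then E.getD 0 nmDfltEntry
         else if lo = n then E.getD (n - 1) nmDfltEntry
         else
           let el := E.getD (lo - 1) nmDfltEntry
           let er := E.getD lo nmDfltEntry
           if t - el.1 < er.1 - t ∨ (t - el.1 = er.1 - t ∧ el.2.1 < er.2.1) then el
           else er).2.2 := by
      rw [nmLookup]
    by_cases h0 : lo = 0
    · refine ⟨0, hn, by rw [hlook, if_pos h0], ?_⟩
      intro q hq hq0
      left
      have hq0' : 0 < q := Nat.pos_of_ne_zero hq0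
      have h1 : t ≤ (E.getD 0 nmDfltEntry).1 := hge_t 0 hn (by omega)
      have h2 : (E.getD 0 nmDfltEntry).1 < (E.getD q nmDfltEntry).1 := hmono 0 q hq0' hq
      have e1 : |t - (E.getD 0 nmDfltEntry).1| = (E.getD 0 nmDfltEntry).1 - t := by
        rw [abs_of_nonpos (by omega)]; ring
      have e2 : |t - (E.getD q nmDfltEntry).1| = (E.getD q nmDfltEntry).1 - t := by
        rw [abs_of_nonpos (by omega)]; ring
      omega
    · by_cases hln : lo = n
      · refine ⟨n - 1, by omega, by rw [hlook, if_neg h0, if_pos hln], ?_⟩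
        intro q hq hqn
        left
        have hq' : q < n - 1 := by omega
        have h1 : (E.getD (n - 1) nmDfltEntry).1 < t := hlt_t (n - 1) (by omega) (by omega)
        have h2 : (E.getD q nmDfltEntry).1 < (E.getD (n - 1) nmDfltEntry).1 :=
          hmono q (n - 1) hq' (by omega)
        have e1 : |t - (E.getD (n - 1) nmDfltEntry).1| = t - (E.getD (n - 1) nmDfltEntry).1 :=
          abs_of_nonneg (by omega)
        have e2 : |t - (E.getD q nmDfltEntry).1| = t - (E.getD q nmDfltEntry).1 :=
          abs_of_nonneg (by omega)
        omega
      · have hlo1 : 1 ≤ lo := by omega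
        have hlon : lo < n := by omega
        have hlol : lo - 1 < n := by omega
        have hl : (E.getD (lo - 1) nmDfltEntry).1 < t := hlt_t (lo - 1) hlol (by omega)
        have hr : t ≤ (E.getD lo nmDfltEntry).1 := hge_t lo hlon (by omega)
        have el1 : |t - (E.getD (lo - 1) nmDfltEntry).1| = t - (E.getD (lo - 1) nmDfltEntry).1 :=
          abs_of_nonneg (by omega)
        have er1 : |t - (E.getD lo nmDfltEntry).1| = (E.getD lo nmDfltEntry).1 - t := by
          rw [abs_of_nonpos (by omega)]; ring
        have hidx : (E.getD (lo - 1) nmDfltEntry).2.1 ≠ (E.getD lo nmDfltEntry).2.1 :=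
          hidx_ne (lo - 1) lo hlol hlon (by omega)
        have hfar : ∀ q, q < n → q ≠ lo - 1 → q ≠ lo →
            t - (E.getD (lo - 1) nmDfltEntry).1 < |t - (E.getD q nmDfltEntry).1| ∨
            (E.getD lo nmDfltEntry).1 - t < |t - (E.getD q nmDfltEntry).1| := by
          intro q hq hq1 hq2
          rcases Nat.lt_or_ge q lo with hqlo | hqlo
          · left
            have hq' : q < lo - 1 := by omega
            have h1 : (E.getD q nmDfltEntry).1 < (E.getD (lo - 1) nmDfltEntry).1 :=
              hmono q (lo - 1) hq' hlol
            have h2 : (E.getD q nmDfltEntry).1 < t := hlt_t q hq (by omega)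
            have e2 : |t - (E.getD q nmDfltEntry).1| = t - (E.getD q nmDfltEntry).1 :=
              abs_of_nonneg (by omega)
            omega
          · right
            have hq' : lo < q := by omega
            have h1 : (E.getD lo nmDfltEntry).1 < (E.getD q nmDfltEntry).1 :=
              hmono lo q hq' hq
            have h2 : t ≤ (E.getD q nmDfltEntry).1 := hge_t q hq (by omega)
            have e2 : |t - (E.getD q nmDfltEntry).1| = (E.getD q nmDfltEntry).1 - t := by
              rw [abs_of_nonpos (by omega)]; ring
            omega
        by_cases hcond : t - (E.getD (lo - 1) nmDfltEntry).1 < (E.getD lo nmDfltEntry).1 - t ∨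
            (t - (E.getD (lo - 1) nmDfltEntry).1 = (E.getD lo nmDfltEntry).1 - t ∧
              (E.getD (lo - 1) nmDfltEntry).2.1 < (E.getD lo nmDfltEntry).2.1)
        · refine ⟨lo - 1, hlol, by rw [hlook, if_neg h0, if_neg hln]; simp only [if_pos hcond], ?_⟩
          intro q hq hq1
          by_cases hq2 : q = lo
          · rw [hq2]
            rcases hcond with hc | ⟨hc1, hc2⟩
            · left; omega
            · right; constructor
              · omega
              · exact hc2
          · have hdl : t - (E.getD (lo - 1) nmDfltEntry).1 ≤ (E.getD lo nmDfltEntry).1 - t := by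
              rcases hcond with hc | ⟨hc1, _⟩ <;> omega
            rcases hfar q hq hq1 hq2 with h | h <;> (left; omega)
        · refine ⟨lo, hlon, by rw [hlook, if_neg h0, if_neg hln]; simp only [if_neg hcond], ?_⟩
          push_neg at hcond
          obtain ⟨hc1, hc2⟩ := hcond
          intro q hq hq2
          by_cases hq1 : q = lo - 1
          · rw [hq1]
            rcases lt_or_eq_of_le hc1 with hc | hc
            · left; omega
            · right; constructor
              · omega
              · have := hc2 hc.symm
                omega
          · rcases hfar q hq hq1 hq2 with h | h <;> (left; omega)
  obtain ⟨k', hk', hbest, hlex⟩ := hmain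
  obtain ⟨k0, hk0, hidx0, hfa0, hcoord0, hfirst0⟩ :=
    hE1 (E.getD k' nmDfltEntry)
      ((nmEntries_mem fa _).mp (by rw [hD k' hk']; exact List.getElem_mem _))
  refine ⟨k0, hk0, by rw [hfa0, hbest], ?_, ?_⟩
  · intro j hj
    obtain ⟨e, he, hec, _⟩ := hE2 j hj
    obtain ⟨q, hq, hEq⟩ := List.mem_iff_getElem.mp ((nmEntries_mem fa e).mpr he)
    have hqn : q < n := by omega
    have heD : E.getD q nmDfltEntry = e := by rw [hD q hqn]; exact hEq
    rw [hbest, hcoord0]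
    by_cases hqk : q = k'
    · subst hqk
      rw [heD] at *
      rw [hec]
    · have h := hlex q hqn hqk
      rw [heD, hec] at h
      rcases h with h | ⟨h, _⟩
      · exact le_of_lt h
      · exact le_of_eq h
  · intro j hj hjk0
    obtain ⟨e, he, hec, hei⟩ := hE2 j hj
    obtain ⟨q, hq, hEq⟩ := List.mem_iff_getElem.mp ((nmEntries_mem fa e).mpr he)
    have hqn : q < n := by omega
    have heD : E.getD q nmDfltEntry = e := by rw [hD q hqn]; exact hEq
    have hcne : fa[j].1 ≠ (E.getD k' nmDfltEntry).1 := hfirst0 j hj hjk0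
    have hqk : q ≠ k' := by
      intro hqe
      subst hqe
      rw [heD] at hcne
      exact hcne hec.symm
    have h := hlex q hqn hqk
    rw [heD, hec] at h
    rw [hbest, hcoord0]
    rcases h with h | ⟨h, hidxlt⟩
    · exact h
    · exfalso
      rw [hidx0] at hidxlt
      omega

-- ---------- assembly ----------
theorem nmPerT (t : Int) (fa : List (Int × String)) (hfa : fa ≠ []) :
    nmLookup t fa = nmInner t fa :=
  firstMin_unique t fa _ _ (nmLookup_firstMin t fa hfa) (nmInner_firstMin t fa hfa)

theorem foldl_snoc_map {α β : Type} (f : α → β) :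
    ∀ (l : List α) (acc : List (α × β)),
      l.foldl (fun r x => r ++ [(x, f x)]) acc = acc ++ l.map (fun x => (x, f x)) := by
  intro l
  induction l with
  | nil => simp
  | cons x xs ih => intro acc; simp [ih]

theorem alt_eq (tg fa : List (Int × String)) :
    nearest_match_alt tg fa = tg.foldl (fun r x => r ++ [(x, nmLookup x.1 fa)]) [] := rfl

theorem a_eq (tg fa : List (Int × String)) (h : ¬(tg.length = 1 ∧ fa.length = 1)) :
    nearest_match tg fa = tg.foldl (fun r x => r ++ [(x, nmInner x.1 fa)]) [] := by
  unfold nearest_match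
  rw [if_neg h]
  rfl

-- ===== VERDICT (by name: the statement is the Claim_ definition above) =====
theorem nearest_match_spec : Claim_equal_nearest_match := by
  intro tg fa hdom hpre
  unfold Spec_nearest_match
  rw [alt_eq, foldl_snoc_map]
  by_cases hsp : tg.length = 1 ∧ fa.length = 1
  · obtain ⟨a, rfl⟩ := List.length_eq_one_iff.mp hsp.1
    obtain ⟨b, rfl⟩ := List.length_eq_one_iff.mp hsp.2
    have hlk : nmLookup a.1 [b] = b := by
      rw [nmPerT a.1 [b] (by simp)]
      have h0 : (PySem.List.pyGet? [b] 0).getD ((0 : Int), "") = b := by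
        simp [PySem.List.pyGet?, PySem.List.pyIdx?]
      simp [nmInner]
    unfold nearest_match
    rw [if_pos hsp]
    simp [PySem.List.pyGet?, PySem.List.pyIdx?, hlk]
  · rw [a_eq tg fa hsp, foldl_snoc_map]
    rcases hpre with rfl | hfa
    · simp
    · simp only [List.nil_append]
      exact List.map_congr_left (fun x _ => by rw [nmPerT x.1 fa hfa])
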